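-- pv_equiv track=rewrite | github.com/D1N0-pixel/Cyber-Guardians-Assignment | Week1/manuscrpyt.py | sub_10003b00
-- ===== SOURCE A (Python) =====
-- def sub_10003b00(data):
--     data = list(data.encode())
--     for i in range(len(data)):
--         if data[i] < 105 or data[i] > 112:
--             if data[i] < 114 or data[i] > 121:
--                 if data[i] < 73 or data[i] > 80:
--                     if data[i] >= 82 and data[i] <= 89:
--                         data[i] -= 9
--                 else:
--                     data[i] += 9
--             else:
--                 data[i] -= 9
--         else:
--             data[i] += 9
--     return ''.join(map(chr, data))
-- ===== SOURCE B (Python) =====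
-- def _make_table():
--     t = bytearray(range(256))
--     for v in range(73, 81):
--         t[v] = v + 9
--     for v in range(105, 113):
--         t[v] = v + 9
--     for v in range(82, 90):
--         t[v] = v - 9
--     for v in range(114, 122):
--         t[v] = v - 9
--     return bytes(t)
--
-- _TABLE = _make_table()
--
-- def sub_10003b00(data):
--     return data.encode().translate(_TABLE).decode('latin-1')
-- ===== Notes on version B (the rewrite author's own statement) =====
-- stated objective: idiomatic
-- what changed: Replaces A's per-byte nested-if loop with a 256-entry translation table built once and applied in a single bytes.translate pass (decoded via latin-1, matching A's per-byte chr join).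
import Mathlib
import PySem

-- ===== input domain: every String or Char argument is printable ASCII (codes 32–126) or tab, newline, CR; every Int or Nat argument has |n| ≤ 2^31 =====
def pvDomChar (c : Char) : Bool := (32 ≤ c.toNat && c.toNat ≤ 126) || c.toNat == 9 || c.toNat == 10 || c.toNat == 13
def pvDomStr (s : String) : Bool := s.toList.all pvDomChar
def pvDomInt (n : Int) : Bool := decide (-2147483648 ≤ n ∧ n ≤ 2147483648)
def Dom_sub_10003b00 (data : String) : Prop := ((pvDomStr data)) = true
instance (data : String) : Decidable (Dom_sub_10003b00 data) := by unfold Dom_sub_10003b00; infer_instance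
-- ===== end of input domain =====

-- B replaces A's per-byte nested-if loop with a precomputed 256-entry translation table
-- applied in one pass (idiomatic bytes.translate style); same O(n) cost.

-- ===== PORT A =====
-- the nested-if body of A's loop, on one byte value
def pvShiftA (b : Nat) : Nat :=
  if b < 105 ∨ b > 112 then
    if b < 114 ∨ b > 121 then
      if b < 73 ∨ b > 80 then
        if b ≥ 82 ∧ b ≤ 89 then b - 9 else b
      else b + 9
    else b - 9
  else b + 9

-- A: list(data.encode()) (ASCII on Dom, so the code points), element-wise update, ''.join(map(chr, …))
def sub_10003b00 (data : String) : String :=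
  String.mk ((data.toList.map (fun c => c.toNat)).map (fun b => Char.ofNat (pvShiftA b)))

-- ===== PORT B =====
-- _make_table: bytearray(range(256)), then four range loops overwrite entries
def pvTable : List Nat :=
  let t0 := List.range 256
  let t1 := (List.range' 73 8).foldl (fun t v => t.set v (v + 9)) t0
  let t2 := (List.range' 105 8).foldl (fun t v => t.set v (v + 9)) t1
  let t3 := (List.range' 82 8).foldl (fun t v => t.set v (v - 9)) t2
  (List.range' 114 8).foldl (fun t v => t.set v (v - 9)) t3

-- data.encode().translate(_TABLE).decode('latin-1'): each byte looked up in the table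
def sub_10003b00_alt (data : String) : String :=
  String.mk ((data.toList.map (fun c => c.toNat)).map (fun b => Char.ofNat (pvTable.getD b 0)))

-- ===== PRECONDITION & SPEC =====
def Spec_sub_10003b00 (data : String) (out : String) : Prop := out = sub_10003b00_alt data
instance (data : String) (out : String) : Decidable (Spec_sub_10003b00 data out) := by unfold Spec_sub_10003b00; infer_instance

-- ===== CLAIM (what is proved, stated in full; the proofs are below) =====
def Claim_equal_sub_10003b00 : Prop := ∀ (data : String), Dom_sub_10003b00 data → Spec_sub_10003b00 data (sub_10003b00 data)

-- ===== LEMMAS AND PROOFS =====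
-- on every byte value below 128 (all of Dom), A's nested ifs and B's table agree
set_option maxRecDepth 4096 in
theorem pvShiftA_eq_table : ∀ n < 128, pvShiftA n = pvTable.getD n 0 := by decide

-- ===== VERDICT (by name: the statement is the Claim_ definition above) =====
theorem sub_10003b00_spec : Claim_equal_sub_10003b00 := by
  intro data h
  unfold Spec_sub_10003b00 sub_10003b00 sub_10003b00_alt
  congr 1
  apply List.map_congr_left
  intro b hb
  obtain ⟨c, hc, rfl⟩ := List.mem_map.mp hb
  have hd : pvDomChar c = true := List.all_eq_true.mp h c hc
  have hlt : c.toNat < 128 := by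
    simp only [pvDomChar, Bool.or_eq_true, Bool.and_eq_true, decide_eq_true_eq,
      beq_iff_eq] at hd
    omega
  rw [pvShiftA_eq_table _ hlt]
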